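-- pv_equiv track=rewrite | github.com/bssrdf/pyleet | CountNumberofWaystoPlaceHouses.py | countHousePlacements2
-- ===== SOURCE A (Python) =====
-- def countHousePlacements2(n: int) -> int:
--     dp, dp1 = [0]*4, [0]*4
--     dp[2] = 1
--     mod = 10**9 +7
--     for i in range(1, n+1):
--         dp1[0] = (dp[1] + dp[2]) % mod
--         dp1[1] = (dp[0] + dp[2]) % mod
--         dp1[2] = (dp[0] + dp[1] + dp[2] + dp[3]) % mod
--         dp1[3] = dp[2] % mod
--         dp, dp1 = dp1, dp
--
--     return sum(dp) % mod
-- ===== SOURCE B (Python) =====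
-- def countHousePlacements2(n: int) -> int:
--     MOD = 10**9 + 7
--
--     def fib_pair(k):
--         # (fib(k) % MOD, fib(k+1) % MOD) by fast doubling
--         if k == 0:
--             return (0, 1)
--         a, b = fib_pair(k >> 1)
--         c = a * (2 * b - a) % MOD
--         d = (a * a + b * b) % MOD
--         if k & 1:
--             return (d, (c + d) % MOD)
--         return (c, d)
--
--     f = fib_pair(max(n, 0) + 2)[0]
--     return f * f % MOD
-- ===== Notes on version B (the rewrite author's own statement) =====
-- stated objective: faster
-- what changed: Replaced the O(n) 4-state DP loop by the closed form fib(n+2)^2 mod 1e9+7, computed with fast-doubling Fibonacci in O(log n).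
import Mathlib
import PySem

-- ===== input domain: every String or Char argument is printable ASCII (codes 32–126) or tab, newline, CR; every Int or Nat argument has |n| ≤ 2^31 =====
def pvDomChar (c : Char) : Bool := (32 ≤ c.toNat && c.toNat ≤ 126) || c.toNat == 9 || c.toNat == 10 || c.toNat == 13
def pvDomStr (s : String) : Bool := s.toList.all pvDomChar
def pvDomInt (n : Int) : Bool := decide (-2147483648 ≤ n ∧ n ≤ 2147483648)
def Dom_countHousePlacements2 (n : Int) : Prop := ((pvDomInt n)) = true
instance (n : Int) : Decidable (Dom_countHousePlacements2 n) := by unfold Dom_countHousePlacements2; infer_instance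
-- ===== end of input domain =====

-- B replaces A's O(n) 4-state DP loop by the closed form fib(n+2)^2 mod 1e9+7 via fast-doubling Fibonacci (objective: faster, asymptotically).

-- ===== PORT A =====
def pvP : Int := 1000000007

-- one iteration of A's loop body; dp is the 4-slot list (dp[0],dp[1],dp[2],dp[3]);
-- the dp,dp1 swap just installs the freshly computed slots as the new dp
def pvStepA (s : Int × Int × Int × Int) : Int × Int × Int × Int :=
  (PySem.Int.mod (s.2.1 + s.2.2.1) pvP,
   PySem.Int.mod (s.1 + s.2.2.1) pvP,
   PySem.Int.mod (s.1 + s.2.1 + s.2.2.1 + s.2.2.2) pvP,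
   PySem.Int.mod s.2.2.1 pvP)

def countHousePlacements2 (n : Int) : Int :=
  let dp := (PySem.List.pyRange 1 (n + 1) 1).foldl (fun s _ => pvStepA s) (0, 0, 1, 0)
  PySem.Int.mod (dp.1 + dp.2.1 + dp.2.2.1 + dp.2.2.2) pvP

-- ===== PORT B =====
-- fast-doubling: (fib k % MOD, fib (k+1) % MOD)
def pvFibPair (k : Nat) : Int × Int :=
  if h : k = 0 then (0, 1)
  else
    let ab := pvFibPair (k / 2)
    let c := PySem.Int.mod (ab.1 * (2 * ab.2 - ab.1)) pvP
    let d := PySem.Int.mod (ab.1 * ab.1 + ab.2 * ab.2) pvP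
    if k % 2 = 1 then (d, PySem.Int.mod (c + d) pvP) else (c, d)
decreasing_by exact Nat.div_lt_self (Nat.pos_of_ne_zero h) one_lt_two

def countHousePlacements2_alt (n : Int) : Int :=
  let f := (pvFibPair ((max n 0).toNat + 2)).1
  PySem.Int.mod (f * f) pvP

-- ===== PRECONDITION & SPEC =====
def Spec_countHousePlacements2 (n : Int) (out : Int) : Prop := out = countHousePlacements2_alt n
instance (n : Int) (out : Int) : Decidable (Spec_countHousePlacements2 n out) := by unfold Spec_countHousePlacements2; infer_instance

-- ===== CLAIM (what is proved, stated in full; the proofs are below) =====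
def Claim_equal_countHousePlacements2 : Prop := ∀ (n : Int), Dom_countHousePlacements2 n → Spec_countHousePlacements2 n (countHousePlacements2 n)

-- ===== LEMMAS AND PROOFS =====

theorem pvP_pos : (0 : Int) < pvP := by decide

-- PySem mod with the positive modulus pvP is Int.emod
theorem pvmod_eq (a : Int) : PySem.Int.mod a pvP = a % pvP :=
  PySem.Int.mod_eq_emod_of_pos pvP_pos

theorem pv_modeq (x : Int) : x % pvP ≡ x [ZMOD pvP] :=
  Int.emod_emod_of_dvd x dvd_rfl

-- a fold that ignores the list elements is an iterate
theorem foldl_ignore {α β : Type} (g : α → α) (l : List β) (s : α) :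
    l.foldl (fun s _ => g s) s = g^[l.length] s := by
  induction l generalizing s with
  | nil => rfl
  | cons x xs ih => simp [List.foldl, Function.iterate_succ_apply, ih]

theorem fib_two_mul_int (k : Nat) :
    ((Nat.fib (2 * k) : Int)) = (Nat.fib k : Int) * (2 * (Nat.fib (k + 1) : Int) - (Nat.fib k : Int)) := by
  have h : Nat.fib k ≤ 2 * Nat.fib (k + 1) :=
    le_trans (Nat.fib_le_fib_succ) (by omega)
  rw [Nat.fib_two_mul]
  push_cast [Nat.cast_sub h]
  ring

theorem fib_two_mul_add_one_int (k : Nat) :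
    ((Nat.fib (2 * k + 1) : Int)) = (Nat.fib (k + 1) : Int) * Nat.fib (k + 1) + (Nat.fib k : Int) * Nat.fib k := by
  rw [Nat.fib_two_mul_add_one]
  push_cast
  ring

theorem pvFibPair_eq (k : Nat) :
    pvFibPair k = ((Nat.fib k : Int) % pvP, (Nat.fib (k + 1) : Int) % pvP) := by
  induction k using Nat.strong_induction_on with
  | _ k ih =>
    rw [pvFibPair]
    by_cases h : k = 0
    · subst h; simp; decide
    · simp only [dif_neg h]
      have ihk := ih (k / 2) (Nat.div_lt_self (Nat.pos_of_ne_zero h) one_lt_two)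
      set j := k / 2 with hj
      rw [ihk]
      have hc : PySem.Int.mod (((Nat.fib j : Int) % pvP) * (2 * ((Nat.fib (j + 1) : Int) % pvP) - (Nat.fib j : Int) % pvP)) pvP
          = (Nat.fib (2 * j) : Int) % pvP := by
        rw [pvmod_eq]
        have : ((Nat.fib j : Int) % pvP) * (2 * ((Nat.fib (j + 1) : Int) % pvP) - (Nat.fib j : Int) % pvP)
            ≡ (Nat.fib j : Int) * (2 * (Nat.fib (j + 1) : Int) - (Nat.fib j : Int)) [ZMOD pvP] :=
          (pv_modeq _).mul (((pv_modeq _).mul_left 2).sub (pv_modeq _))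
        calc _ = (Nat.fib j : Int) * (2 * (Nat.fib (j + 1) : Int) - (Nat.fib j : Int)) % pvP := this
          _ = (Nat.fib (2 * j) : Int) % pvP := by rw [fib_two_mul_int]
      have hd : PySem.Int.mod (((Nat.fib j : Int) % pvP) * ((Nat.fib j : Int) % pvP) + ((Nat.fib (j + 1) : Int) % pvP) * ((Nat.fib (j + 1) : Int) % pvP)) pvP
          = (Nat.fib (2 * j + 1) : Int) % pvP := by
        rw [pvmod_eq]
        have : ((Nat.fib j : Int) % pvP) * ((Nat.fib j : Int) % pvP) + ((Nat.fib (j + 1) : Int) % pvP) * ((Nat.fib (j + 1) : Int) % pvP)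
            ≡ (Nat.fib j : Int) * (Nat.fib j : Int) + (Nat.fib (j + 1) : Int) * (Nat.fib (j + 1) : Int) [ZMOD pvP] :=
          ((pv_modeq _).mul (pv_modeq _)).add ((pv_modeq _).mul (pv_modeq _))
        calc _ = ((Nat.fib j : Int) * (Nat.fib j : Int) + (Nat.fib (j + 1) : Int) * (Nat.fib (j + 1) : Int)) % pvP := this
          _ = (Nat.fib (2 * j + 1) : Int) % pvP := by rw [fib_two_mul_add_one_int]; ring_nf
      simp only []
      by_cases hpar : k % 2 = 1
      · have hk : k = 2 * j + 1 := by omega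
        simp only [if_pos hpar, hc, hd, Prod.mk.injEq]
        refine ⟨by rw [hk], ?_⟩
        rw [pvmod_eq]
        have heq : (Nat.fib (2 * j) : Int) % pvP + (Nat.fib (2 * j + 1) : Int) % pvP
            ≡ (Nat.fib (2 * j) : Int) + (Nat.fib (2 * j + 1) : Int) [ZMOD pvP] :=
          (pv_modeq _).add (pv_modeq _)
        calc _ = ((Nat.fib (2 * j) : Int) + (Nat.fib (2 * j + 1) : Int)) % pvP := heq
          _ = (Nat.fib (k + 1) : Int) % pvP := by
              have hsum : Nat.fib (2 * j) + Nat.fib (2 * j + 1) = Nat.fib (k + 1) := by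
                rw [hk]; rw [← Nat.fib_add_two]
              rw [← hsum]; push_cast; ring_nf
      · have hk : k = 2 * j := by omega
        simp only [if_neg hpar, hc, hd, Prod.mk.injEq]
        exact ⟨by rw [hk], by rw [hk]⟩

-- A's loop invariant: after m iterations dp = (fib m·fib(m+1), fib m·fib(m+1), fib(m+1)², fib m²), each mod pvP
theorem stepA_iter (m : Nat) :
    pvStepA^[m] (0, 0, 1, 0)
      = ((Nat.fib m : Int) * Nat.fib (m + 1) % pvP,
         (Nat.fib m : Int) * Nat.fib (m + 1) % pvP,
         (Nat.fib (m + 1) : Int) * Nat.fib (m + 1) % pvP,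
         (Nat.fib m : Int) * Nat.fib m % pvP) := by
  induction m with
  | zero => simp; decide
  | succ m ih =>
    rw [Function.iterate_succ_apply', ih]
    have hfib : (Nat.fib (m + 2) : Int) = (Nat.fib m : Int) + Nat.fib (m + 1) := by
      rw [Nat.fib_add_two]; push_cast; ring
    refine Prod.ext ?_ (Prod.ext ?_ (Prod.ext ?_ ?_)) <;>
      simp only [pvStepA, pvmod_eq]
    · have : (Nat.fib m : Int) * Nat.fib (m + 1) % pvP + (Nat.fib (m + 1) : Int) * Nat.fib (m + 1) % pvP
          ≡ (Nat.fib m : Int) * Nat.fib (m + 1) + (Nat.fib (m + 1) : Int) * Nat.fib (m + 1) [ZMOD pvP] :=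
        (pv_modeq _).add (pv_modeq _)
      calc _ = ((Nat.fib m : Int) * Nat.fib (m + 1) + (Nat.fib (m + 1) : Int) * Nat.fib (m + 1)) % pvP := this
        _ = _ := by rw [show ((Nat.fib (m+1) : Int) * Nat.fib (m+1+1)) = (Nat.fib m : Int) * Nat.fib (m + 1) + (Nat.fib (m + 1) : Int) * Nat.fib (m + 1) by rw [hfib]; ring]
    · have : (Nat.fib m : Int) * Nat.fib (m + 1) % pvP + (Nat.fib (m + 1) : Int) * Nat.fib (m + 1) % pvP
          ≡ (Nat.fib m : Int) * Nat.fib (m + 1) + (Nat.fib (m + 1) : Int) * Nat.fib (m + 1) [ZMOD pvP] :=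
        (pv_modeq _).add (pv_modeq _)
      calc _ = ((Nat.fib m : Int) * Nat.fib (m + 1) + (Nat.fib (m + 1) : Int) * Nat.fib (m + 1)) % pvP := this
        _ = _ := by rw [show ((Nat.fib (m+1) : Int) * Nat.fib (m+1+1)) = (Nat.fib m : Int) * Nat.fib (m + 1) + (Nat.fib (m + 1) : Int) * Nat.fib (m + 1) by rw [hfib]; ring]
    · have : (Nat.fib m : Int) * Nat.fib (m + 1) % pvP + (Nat.fib m : Int) * Nat.fib (m + 1) % pvP
          + (Nat.fib (m + 1) : Int) * Nat.fib (m + 1) % pvP + (Nat.fib m : Int) * Nat.fib m % pvP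
          ≡ (Nat.fib m : Int) * Nat.fib (m + 1) + (Nat.fib m : Int) * Nat.fib (m + 1)
          + (Nat.fib (m + 1) : Int) * Nat.fib (m + 1) + (Nat.fib m : Int) * Nat.fib m [ZMOD pvP] :=
        (((pv_modeq _).add (pv_modeq _)).add (pv_modeq _)).add (pv_modeq _)
      calc _ = ((Nat.fib m : Int) * Nat.fib (m + 1) + (Nat.fib m : Int) * Nat.fib (m + 1)
          + (Nat.fib (m + 1) : Int) * Nat.fib (m + 1) + (Nat.fib m : Int) * Nat.fib m) % pvP := this
        _ = _ := by rw [show ((Nat.fib (m+1+1) : Int) * Nat.fib (m+1+1)) = (Nat.fib m : Int) * Nat.fib (m + 1) + (Nat.fib m : Int) * Nat.fib (m + 1) + (Nat.fib (m + 1) : Int) * Nat.fib (m + 1) + (Nat.fib m : Int) * Nat.fib m by rw [hfib]; ring]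
    · exact pv_modeq _

-- ===== VERDICT (by name: the statement is the Claim_ definition above) =====
theorem countHousePlacements2_spec : Claim_equal_countHousePlacements2 := by
  intro n _
  unfold Spec_countHousePlacements2 countHousePlacements2 countHousePlacements2_alt
  have hm : (max n 0).toNat = n.toNat := by omega
  rw [hm]
  set m := n.toNat with hmn
  rw [foldl_ignore, PySem.List.length_pyRange_one,
      show (n + 1 - 1).toNat = m by omega, stepA_iter, pvFibPair_eq]
  simp only [pvmod_eq]
  have h1 : (Nat.fib m : Int) * Nat.fib (m + 1) % pvP + (Nat.fib m : Int) * Nat.fib (m + 1) % pvP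
      + (Nat.fib (m + 1) : Int) * Nat.fib (m + 1) % pvP + (Nat.fib m : Int) * Nat.fib m % pvP
      ≡ (Nat.fib (m + 2) : Int) * Nat.fib (m + 2) [ZMOD pvP] := by
    have h : (Nat.fib m : Int) * Nat.fib (m + 1) % pvP + (Nat.fib m : Int) * Nat.fib (m + 1) % pvP
        + (Nat.fib (m + 1) : Int) * Nat.fib (m + 1) % pvP + (Nat.fib m : Int) * Nat.fib m % pvP
        ≡ (Nat.fib m : Int) * Nat.fib (m + 1) + (Nat.fib m : Int) * Nat.fib (m + 1)
        + (Nat.fib (m + 1) : Int) * Nat.fib (m + 1) + (Nat.fib m : Int) * Nat.fib m [ZMOD pvP] :=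
      (((pv_modeq _).add (pv_modeq _)).add (pv_modeq _)).add (pv_modeq _)
    refine h.trans ?_
    have hfib : (Nat.fib (m + 2) : Int) = (Nat.fib m : Int) + Nat.fib (m + 1) := by
      rw [Nat.fib_add_two]; push_cast; ring
    rw [show (Nat.fib (m + 2) : Int) * Nat.fib (m + 2)
        = (Nat.fib m : Int) * Nat.fib (m + 1) + (Nat.fib m : Int) * Nat.fib (m + 1)
        + (Nat.fib (m + 1) : Int) * Nat.fib (m + 1) + (Nat.fib m : Int) * Nat.fib m by rw [hfib]; ring]
  have h2 : (Nat.fib (m + 2) : Int) % pvP * ((Nat.fib (m + 2) : Int) % pvP)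
      ≡ (Nat.fib (m + 2) : Int) * Nat.fib (m + 2) [ZMOD pvP] :=
    (pv_modeq _).mul (pv_modeq _)
  exact h1.trans h2.symm
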